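-- pv_equiv track=rewrite | github.com/sam201401/intros | api/models.py | _sanitize_fts_query
-- ===== SOURCE A (Python) =====
-- def _sanitize_fts_query(text: str) -> str:
--     """Build an OR query from text, stripping FTS5 special chars"""
--     terms = text.replace(',', ' ').split()
--     safe = []
--     for t in terms:
--         cleaned = ''.join(ch for ch in t if ch.isalnum() or ch == '_')
--         if cleaned:
--             safe.append(cleaned)
--     return ' OR '.join(safe) if safe else ''
-- ===== SOURCE B (Python) =====
-- def _sanitize_fts_query(text: str) -> str:
--     """Build an OR query from text, stripping FTS5 special chars"""
--     filtered = ''.join(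
--         ch for ch in text.replace(',', ' ')
--         if ch.isalnum() or ch == '_' or ch.isspace()
--     )
--     return ' OR '.join(filtered.split())
-- ===== Notes on version B (the rewrite author's own statement) =====
-- stated objective: alternative
-- what changed: B reverses A's decomposition: instead of splitting into tokens and then filtering each token's characters, B makes one character-level pass that deletes every non-(alnum/underscore/whitespace) char from the whole string and only then splits and joins.
import Mathlib
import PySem

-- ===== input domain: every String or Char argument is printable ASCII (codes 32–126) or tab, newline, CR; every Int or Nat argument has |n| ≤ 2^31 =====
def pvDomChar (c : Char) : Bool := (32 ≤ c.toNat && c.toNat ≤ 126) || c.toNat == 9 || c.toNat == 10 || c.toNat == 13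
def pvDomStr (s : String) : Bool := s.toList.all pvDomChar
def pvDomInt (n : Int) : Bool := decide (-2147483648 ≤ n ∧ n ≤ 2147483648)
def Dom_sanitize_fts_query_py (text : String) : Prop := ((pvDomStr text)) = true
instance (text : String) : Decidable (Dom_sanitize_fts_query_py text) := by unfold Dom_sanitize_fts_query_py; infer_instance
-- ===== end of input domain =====

-- B re-decomposes A (one char-level filter pass, then split) instead of A's split-then-per-token filter; same cost, proved equal.

-- the per-character test both programs use: ch.isalnum() or ch == '_'
def pyKeep (ch : Char) : Bool := PySem.Chars.isalnum ch || ch == '_'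

-- ===== PORT A =====
def sanitize_fts_query_py (text : String) : String :=
  let terms := PySem.Chars.split₀ (PySem.Chars.replace text.toList [','] [' '])
  let safe := terms.foldl (fun safe t =>
    let cleaned := PySem.Chars.join [] ((t.filter pyKeep).map (fun ch => [ch]))
    if cleaned.isEmpty then safe else safe ++ [cleaned]) []
  String.ofList (if safe.isEmpty then [] else PySem.Chars.join " OR ".toList safe)

-- ===== PORT B =====
def sanitize_fts_query_py_alt (text : String) : String :=
  let filtered := (PySem.Chars.replace text.toList [','] [' ']).filter
      (fun ch => pyKeep ch || PySem.Chars.isspace ch)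
  String.ofList (PySem.Chars.join " OR ".toList (PySem.Chars.split₀ filtered))

-- ===== PRECONDITION & SPEC =====
def Spec_sanitize_fts_query_py (text : String) (out : String) : Prop := out = sanitize_fts_query_py_alt text
instance (text : String) (out : String) : Decidable (Spec_sanitize_fts_query_py text out) := by unfold Spec_sanitize_fts_query_py; infer_instance

-- ===== CLAIM (what is proved, stated in full; the proofs are below) =====
def Claim_equal_sanitize_fts_query_py : Prop := ∀ (text : String), Dom_sanitize_fts_query_py text → Spec_sanitize_fts_query_py text (sanitize_fts_query_py text)

-- ===== LEMMAS AND PROOFS =====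

-- a keep-char (alnum or '_') is never whitespace
theorem keep_not_space (c : Char) (h : pyKeep c = true) : PySem.Chars.isspace c = false := by
  have hv : c.val.toNat = c.toNat := rfl
  have hkey : (48 ≤ c.toNat ∧ c.toNat ≤ 57) ∨ (65 ≤ c.toNat ∧ c.toNat ≤ 90) ∨
      (97 ≤ c.toNat ∧ c.toNat ≤ 122) ∨ c.toNat = 95 := by
    simp only [pyKeep, PySem.Chars.isalnum, PySem.Chars.isalpha, PySem.Chars.isupper,
      PySem.Chars.islower, PySem.Chars.isdigit, Bool.or_eq_true, Bool.and_eq_true,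
      decide_eq_true_eq, beq_iff_eq, Char.le_def, UInt32.le_iff_toNat_le] at h
    rcases h with ((h|h)|h)|h
    · have h1 := h.1; have h2 := h.2; right; left
      rw [hv] at h1 h2; exact ⟨h1, h2⟩
    · have h1 := h.1; have h2 := h.2; right; right; left
      rw [hv] at h1 h2; exact ⟨h1, h2⟩
    · have h1 := h.1; have h2 := h.2; left
      rw [hv] at h1 h2; exact ⟨h1, h2⟩
    · right; right; right; rw [h]; rfl
  simp only [PySem.Chars.isspace, Bool.or_eq_false_iff, Bool.and_eq_false_iff,
    decide_eq_false_iff_not]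
  omega

-- the word the splitter would emit from the (reversed) in-progress buffer
def pvWord (cur : List Char) : List (List Char) := if cur.isEmpty then [] else [cur.reverse]

-- accumulator-free shape of split₀.go
def pvAux : List Char → List Char → List (List Char)
  | [], cur => pvWord cur
  | c :: rest, cur =>
      if PySem.Chars.isspace c then pvWord cur ++ pvAux rest [] else pvAux rest (c :: cur)

theorem go_eq_pvAux (l : List Char) : ∀ cur acc,
    PySem.Chars.split₀.go l cur acc = acc.reverse ++ pvAux l cur := by
  induction l with
  | nil =>
      intro cur acc
      simp only [PySem.Chars.split₀.go, pvAux, pvWord]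
      by_cases h : cur.isEmpty <;> simp [h]
  | cons c rest ih =>
      intro cur acc
      simp only [PySem.Chars.split₀.go, pvAux, pvWord]
      by_cases hs : PySem.Chars.isspace c
      · by_cases h : cur.isEmpty <;> simp [hs, h, ih]
      · simp [hs, ih]

theorem split₀_eq_pvAux (l : List Char) : PySem.Chars.split₀ l = pvAux l [] := by
  simpa using go_eq_pvAux l [] []

theorem pvWord_filter (cur : List Char) :
    pvWord (cur.filter pyKeep) = ((pvWord cur).map (fun t => t.filter pyKeep)).filter (fun t => !t.isEmpty) := by
  by_cases h : cur = []
  · subst h; rfl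
  · have h1 : cur.isEmpty = false := by simpa [List.isEmpty_iff] using h
    by_cases h2 : List.filter pyKeep cur = []
    · simp [pvWord, h1, h2, List.filter_reverse]
    · have h3 : (List.filter pyKeep cur).isEmpty = false := by simpa [List.isEmpty_iff] using h2
      simp [pvWord, h1, h3, List.filter_reverse]

-- main: filtering the chars first and then splitting gives exactly the
-- split-then-filter tokens with the empty ones dropped
theorem pvAux_filter (l : List Char) : ∀ curA,
    pvAux (l.filter (fun c => pyKeep c || PySem.Chars.isspace c)) (curA.filter pyKeep)
      = ((pvAux l curA).map (fun t => t.filter pyKeep)).filter (fun t => !t.isEmpty) := by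
  induction l with
  | nil => intro curA; exact pvWord_filter curA
  | cons c rest ih =>
      intro curA
      by_cases hk : pyKeep c = true
      · have hs : PySem.Chars.isspace c = false := keep_not_space c hk
        have hstep : (c :: rest).filter (fun c => pyKeep c || PySem.Chars.isspace c)
            = c :: rest.filter (fun c => pyKeep c || PySem.Chars.isspace c) := by simp [hk]
        have hcc : (c :: curA).filter pyKeep = c :: curA.filter pyKeep := by simp [hk]
        rw [hstep]
        show pvAux (c :: _) _ = _
        simp only [pvAux, hs, Bool.false_eq_true, if_false]
        rw [← hcc, ih (c :: curA)]
      · by_cases hs : PySem.Chars.isspace c = true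
        · have hstep : (c :: rest).filter (fun c => pyKeep c || PySem.Chars.isspace c)
              = c :: rest.filter (fun c => pyKeep c || PySem.Chars.isspace c) := by simp [hs]
          rw [hstep]
          show pvAux (c :: _) _ = _
          simp only [pvAux, hs, if_true]
          have hnil : (([] : List Char).filter pyKeep) = [] := rfl
          rw [← hnil, ih [], List.map_append, List.filter_append, pvWord_filter, hnil]
        · have hkf : pyKeep c = false := by simpa using hk
          have hsf : PySem.Chars.isspace c = false := by simpa using hs
          have hstep : (c :: rest).filter (fun c => pyKeep c || PySem.Chars.isspace c)
              = rest.filter (fun c => pyKeep c || PySem.Chars.isspace c) := by simp [hkf, hsf]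
          have hcc : (c :: curA).filter pyKeep = curA.filter pyKeep := by simp [hkf]
          rw [hstep, ← hcc, ih (c :: curA)]
          simp only [pvAux, hsf, Bool.false_eq_true, if_false]

-- A's accumulation loop is a map followed by dropping the empty tokens
theorem safe_fold (ts : List (List Char)) : ∀ acc,
    ts.foldl (fun safe t =>
        let cleaned := t.filter pyKeep
        if cleaned.isEmpty then safe else safe ++ [cleaned]) acc
      = acc ++ (ts.map (fun t => t.filter pyKeep)).filter (fun t => !t.isEmpty) := by
  induction ts with
  | nil => intro acc; simp
  | cons t rest ih =>
      intro acc
      rw [List.foldl_cons]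
      by_cases h : List.filter pyKeep t = []
      · have e : (List.filter pyKeep t).isEmpty = true := by rw [h]; rfl
        simp only [e, if_true, List.map_cons, List.filter_cons, Bool.not_true,
          Bool.false_eq_true, if_false]
        exact ih acc
      · have h2 : (List.filter pyKeep t).isEmpty = false := by simpa [List.isEmpty_iff] using h
        simp only [h2, Bool.false_eq_true, if_false, List.map_cons, List.filter_cons,
          Bool.not_false, if_true]
        rw [ih (acc ++ [List.filter pyKeep t])]
        simp

-- A's trailing "if safe else ''" is redundant: joining the empty list is ''
theorem if_empty_join (x : List (List Char)) :
    (if x.isEmpty then [] else PySem.Chars.join " OR ".toList x)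
      = PySem.Chars.join " OR ".toList x := by
  cases x <;> simp [PySem.Chars.join, List.intercalate]

-- ===== VERDICT (by name: the statement is the Claim_ definition above) =====
theorem sanitize_fts_query_py_spec : Claim_equal_sanitize_fts_query_py := by
  intro text _
  unfold Spec_sanitize_fts_query_py sanitize_fts_query_py sanitize_fts_query_py_alt
  simp only [PySem.Chars.join_nil_singletons]
  rw [safe_fold, if_empty_join]
  rw [split₀_eq_pvAux, split₀_eq_pvAux]
  have h := pvAux_filter (PySem.Chars.replace text.toList [','] [' ']) []
  simp only [List.filter_nil] at h
  rw [h]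
  simp
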